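-- pv_equiv track=rewrite | github.com/jovd83/Playwright-skill | documentation/shared/scripts/reconcile_handoff_pair.py | parse_decisions_and_assumptions
-- ===== SOURCE A (Python) =====
-- def parse_decisions_and_assumptions(text: str) -> tuple[str, str]:
--     decision = "None"
--     assumption = "None"
--     for raw_line in text.splitlines():
--         line = raw_line.strip()
--         if line.startswith("- Decision:"):
--             decision = line.split(":", 1)[1].strip() or "None"
--         elif line.startswith("- Assumption:"):
--             assumption = line.split(":", 1)[1].strip() or "None"
--     return decision, assumption
-- ===== SOURCE B (Python) =====
-- def _value(line):
--     v = line.split(":", 1)[1].strip()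
--     return v if v else "None"
--
-- def parse_decisions_and_assumptions(text: str) -> tuple[str, str]:
--     decision = None
--     assumption = None
--     for raw_line in reversed(text.splitlines()):
--         line = raw_line.strip()
--         if decision is None and line.startswith("- Decision:"):
--             decision = _value(line)
--         if assumption is None and line.startswith("- Assumption:"):
--             assumption = _value(line)
--         if decision is not None and assumption is not None:
--             break
--     return (decision if decision is not None else "None",
--             assumption if assumption is not None else "None")
-- ===== Notes on version B (the rewrite author's own statement) =====
-- stated objective: alternative
-- what changed: A folds forward over all lines, overwriting each field on every match; B walks the lines in reverse, records only the first (i.e. last-in-text) hit per field and breaks as soon as both are found.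
import Mathlib
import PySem

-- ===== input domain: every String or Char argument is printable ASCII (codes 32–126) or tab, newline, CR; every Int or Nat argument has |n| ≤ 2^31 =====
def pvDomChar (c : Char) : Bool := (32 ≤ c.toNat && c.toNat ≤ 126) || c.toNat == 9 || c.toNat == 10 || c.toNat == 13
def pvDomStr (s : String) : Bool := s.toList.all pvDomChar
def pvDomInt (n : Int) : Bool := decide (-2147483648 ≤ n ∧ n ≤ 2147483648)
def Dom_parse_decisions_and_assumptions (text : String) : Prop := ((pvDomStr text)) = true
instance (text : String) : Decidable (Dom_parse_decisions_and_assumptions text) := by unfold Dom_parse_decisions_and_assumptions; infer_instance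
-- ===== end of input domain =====

-- B replaces A's overwrite-as-you-go forward scan by a reverse scan that records only the
-- first (i.e. last-in-text) hit per field and breaks early once both are found (objective: alternative).

-- ===== PORT A =====
-- one loop iteration of A (the pyGet? default "" is unreachable: inside the branch the line
-- contains ':', so split(":",1) has a second element)
def pvStepA (st : String × String) (raw : String) : String × String :=
  let line := PySem.Str.strip raw
  if PySem.Str.startswith line "- Decision:" then
    let v := PySem.Str.strip ((PySem.List.pyGet? ((PySem.Str.splitMax? line ":" 1).getD []) 1).getD "")
    (if v = "" then "None" else v, st.2)
  else if PySem.Str.startswith line "- Assumption:" then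
    let v := PySem.Str.strip ((PySem.List.pyGet? ((PySem.Str.splitMax? line ":" 1).getD []) 1).getD "")
    (st.1, if v = "" then "None" else v)
  else st

def parse_decisions_and_assumptions (text : String) : String × String :=
  (PySem.Str.splitlines text).foldl pvStepA ("None", "None")

-- ===== PORT B =====
-- B's helper _value (same unreachable-default note as in pvStepA)
def pvVal (line : String) : String :=
  let v := PySem.Str.strip ((PySem.List.pyGet? ((PySem.Str.splitMax? line ":" 1).getD []) 1).getD "")
  if v = "" then "None" else v

-- B's reverse loop with early break once both fields are found
def pvGoB : List String → Option String → Option String → Option String × Option String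
  | [], d, a => (d, a)
  | raw :: rest, d, a =>
    let line := PySem.Str.strip raw
    let d' := if d.isNone && PySem.Str.startswith line "- Decision:" then some (pvVal line) else d
    let a' := if a.isNone && PySem.Str.startswith line "- Assumption:" then some (pvVal line) else a
    if d'.isSome && a'.isSome then (d', a') else pvGoB rest d' a'

def parse_decisions_and_assumptions_alt (text : String) : String × String :=
  let r := pvGoB (PySem.Str.splitlines text).reverse none none
  (r.1.getD "None", r.2.getD "None")

-- ===== PRECONDITION & SPEC =====
def Spec_parse_decisions_and_assumptions (text : String) (out : String × String) : Prop := out = parse_decisions_and_assumptions_alt text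
instance (text : String) (out : String × String) : Decidable (Spec_parse_decisions_and_assumptions text out) := by unfold Spec_parse_decisions_and_assumptions; infer_instance

-- ===== CLAIM (what is proved, stated in full; the proofs are below) =====
def Claim_equal_parse_decisions_and_assumptions : Prop := ∀ (text : String), Dom_parse_decisions_and_assumptions text → Spec_parse_decisions_and_assumptions text (parse_decisions_and_assumptions text)

-- ===== LEMMAS AND PROOFS =====

-- value (as pvVal) of the first line in the list whose strip starts with p, if any
def pvFirst (p : String) : List String → Option String
  | [] => none
  | raw :: rest =>
    let line := PySem.Str.strip raw
    if PySem.Str.startswith line p then some (pvVal line) else pvFirst p rest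

theorem pvFirst_append (p : String) (l l' : List String) :
    pvFirst p (l ++ l') = (pvFirst p l).orElse (fun _ => pvFirst p l') := by
  induction l with
  | nil => simp [pvFirst]
  | cons raw rest ih =>
    simp only [List.cons_append, pvFirst]
    split <;> simp [ih]

-- no line starts with both prefixes (they differ at index 2)
theorem pv_not_both (line : String) (hd : PySem.Str.startswith line "- Decision:" = true)
    (ha : PySem.Str.startswith line "- Assumption:" = true) : False := by
  rw [PySem.Str.startswith_eq, PySem.Chars.startswith_iff] at hd ha
  rcases List.prefix_or_prefix_of_prefix hd ha with h | h <;> revert h <;> decide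

theorem pv_getD_orElse {α : Type} (o m : Option α) (x : α) :
    (o.orElse (fun _ => m)).getD x = o.getD (m.getD x) := by
  cases o <;> simp

set_option maxHeartbeats 1000000 in
theorem pvFoldlA (ls : List String) (x y : String) :
    ls.foldl pvStepA (x, y) =
      ((pvFirst "- Decision:" ls.reverse).getD x, (pvFirst "- Assumption:" ls.reverse).getD y) := by
  induction ls generalizing x y with
  | nil => simp [pvFirst]
  | cons raw rest ih =>
    rw [List.foldl_cons, List.reverse_cons]
    by_cases h1 : PySem.Str.startswith (PySem.Str.strip raw) "- Decision:" = true
    · have h2 : ¬ PySem.Str.startswith (PySem.Str.strip raw) "- Assumption:" = true :=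
        fun h => pv_not_both _ h1 h
      have hstep : pvStepA (x, y) raw = (pvVal (PySem.Str.strip raw), y) := by
        simp only [pvStepA, pvVal]; rw [if_pos h1]
      have e1 : pvFirst "- Decision:" [raw] = some (pvVal (PySem.Str.strip raw)) := by
        simp only [pvFirst]; rw [if_pos h1]
      have e2 : pvFirst "- Assumption:" [raw] = none := by
        simp only [pvFirst]; rw [if_neg h2]
      rw [hstep, ih, pvFirst_append, pvFirst_append, pv_getD_orElse, pv_getD_orElse, e1, e2]; simp only [Option.getD_some, Option.getD_none]
    · by_cases h2 : PySem.Str.startswith (PySem.Str.strip raw) "- Assumption:" = true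
      · have hstep : pvStepA (x, y) raw = (x, pvVal (PySem.Str.strip raw)) := by
          simp only [pvStepA, pvVal]; rw [if_neg h1, if_pos h2]
        have e1 : pvFirst "- Decision:" [raw] = none := by
          simp only [pvFirst]; rw [if_neg h1]
        have e2 : pvFirst "- Assumption:" [raw] = some (pvVal (PySem.Str.strip raw)) := by
          simp only [pvFirst]; rw [if_pos h2]
        rw [hstep, ih, pvFirst_append, pvFirst_append, pv_getD_orElse, pv_getD_orElse, e1, e2]; simp only [Option.getD_some, Option.getD_none]
      · have hstep : pvStepA (x, y) raw = (x, y) := by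
          simp only [pvStepA]; rw [if_neg h1, if_neg h2]
        have e1 : pvFirst "- Decision:" [raw] = none := by
          simp only [pvFirst]; rw [if_neg h1]
        have e2 : pvFirst "- Assumption:" [raw] = none := by
          simp only [pvFirst]; rw [if_neg h2]
        rw [hstep, ih, pvFirst_append, pvFirst_append, pv_getD_orElse, pv_getD_orElse, e1, e2]; simp only [Option.getD_none]

set_option maxHeartbeats 1000000 in
theorem pvGoB_eq (r : List String) (d a : Option String) :
    pvGoB r d a =
      (d.orElse (fun _ => pvFirst "- Decision:" r), a.orElse (fun _ => pvFirst "- Assumption:" r)) := by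
  induction r generalizing d a with
  | nil => cases d <;> cases a <;> simp [pvGoB, pvFirst, Option.orElse]
  | cons raw rest ih =>
    by_cases hD : PySem.Str.startswith (PySem.Str.strip raw) "- Decision:" = true <;>
    by_cases hA : PySem.Str.startswith (PySem.Str.strip raw) "- Assumption:" = true <;>
    simp at hD hA <;>
    cases d <;> cases a <;>
      simp [pvGoB, pvFirst, hD, hA, ih, Option.orElse]

-- ===== VERDICT (by name: the statement is the Claim_ definition above) =====
theorem parse_decisions_and_assumptions_spec : Claim_equal_parse_decisions_and_assumptions := by
  intro text _
  unfold Spec_parse_decisions_and_assumptions parse_decisions_and_assumptions parse_decisions_and_assumptions_alt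
  rw [pvFoldlA, pvGoB_eq]
  simp
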